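-- pv_equiv track=rewrite | github.com/RicardoRodriguesCosta/PythonExercises | resolutions_checkio/elementary/remove_all_before.py | remove_all_before
-- ===== SOURCE A (Python) =====
-- from typing import Iterable
--
-- def remove_all_before(items: list, border: int) -> Iterable:
--     itemss = []
--     try:
--         for i in items[items.index(border):]:
--             itemss.append(i)
--     except:
--         for i in range(0,len(items)):
--             itemss.append(items[i])
--     return itemss
-- ===== SOURCE B (Python) =====
-- def remove_all_before(items: list, border: int):
--     started = False
--     result = []
--     for x in items:
--         if not started and x == border:
--             started = True
--         if started:
--             result.append(x)
--     return result if started else list(items)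
-- ===== Notes on version B (the rewrite author's own statement) =====
-- stated objective: simpler
-- what changed: Replaced the two-phase try/except locate-with-.index-then-copy-the-slice approach by a single linear scan with a started flag that begins collecting at the first occurrence of border.
import Mathlib
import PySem

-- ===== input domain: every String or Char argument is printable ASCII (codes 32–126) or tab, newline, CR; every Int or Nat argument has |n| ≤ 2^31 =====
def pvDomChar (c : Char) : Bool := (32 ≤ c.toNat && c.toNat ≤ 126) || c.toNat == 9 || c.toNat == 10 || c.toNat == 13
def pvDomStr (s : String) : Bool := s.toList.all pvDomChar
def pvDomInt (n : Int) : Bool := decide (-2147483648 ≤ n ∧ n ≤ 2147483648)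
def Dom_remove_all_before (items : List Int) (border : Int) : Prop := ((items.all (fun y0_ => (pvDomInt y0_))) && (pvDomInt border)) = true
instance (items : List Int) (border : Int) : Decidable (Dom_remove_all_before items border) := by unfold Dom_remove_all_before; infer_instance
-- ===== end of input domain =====

-- ===== PORT A =====
-- A: try items[items.index(border):] (ValueError when absent -> except copies the whole list).
def remove_all_before (items : List Int) (border : Int) : List Int :=
  match PySem.List.index? items border with
  | some i =>
      (PySem.List.slice items (some (i : Int)) none).foldl (fun acc x => acc ++ [x]) []
  | none =>
      (PySem.List.pyRange 0 items.length 1).foldl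
        (fun acc j => acc ++ (PySem.List.pyGet? items j).toList) []

-- ===== PORT B =====
-- B: one pass with a started flag; collect from the first element equal to border.
-- loop body of B's scan
def pvBStep (border : Int) (st : Bool × List Int) (x : Int) : Bool × List Int :=
  let st := if !st.1 && x == border then (true, st.2) else st
  if st.1 then (st.1, st.2 ++ [x]) else st

def remove_all_before_alt (items : List Int) (border : Int) : List Int :=
  let st := items.foldl (pvBStep border) (false, [])
  if st.1 then st.2 else items

-- ===== PRECONDITION & SPEC =====
def Spec_remove_all_before (items : List Int) (border : Int) (out : List Int) : Prop := out = remove_all_before_alt items border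
instance (items : List Int) (border : Int) (out : List Int) : Decidable (Spec_remove_all_before items border out) := by unfold Spec_remove_all_before; infer_instance

-- ===== CLAIM (what is proved, stated in full; the proofs are below) =====
def Claim_equal_remove_all_before : Prop := ∀ (items : List Int) (border : Int), Dom_remove_all_before items border → Spec_remove_all_before items border (remove_all_before items border)

-- ===== LEMMAS AND PROOFS =====

-- ===== VERDICT (by name: the statement is the Claim_ definition above) =====

lemma foldl_snoc (l acc : List Int) :
    l.foldl (fun a x => a ++ [x]) acc = acc ++ l := by
  induction l generalizing acc with
  | nil => simp
  | cons x xs ih => simp [List.foldl, ih]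

lemma bstep_true (l acc : List Int) (border : Int) :
    l.foldl (pvBStep border) (true, acc) = (true, acc ++ l) := by
  induction l generalizing acc with
  | nil => simp
  | cons x xs ih =>
    rw [List.foldl_cons]
    have h : pvBStep border (true, acc) x = (true, acc ++ [x]) := by
      simp [pvBStep]
    rw [h, ih]; simp

lemma fold_char (l : List Int) (border : Int) :
    l.foldl (pvBStep border) (false, []) =
      (match PySem.List.index? l border with
       | some i => (true, l.drop i)
       | none => (false, ([] : List Int))) := by
  induction l with
  | nil => simp [PySem.List.index?]
  | cons x xs ih =>
    by_cases hx : x = border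
    · subst hx
      rw [PySem.List.index?_cons_self, List.foldl_cons]
      have h : pvBStep x (false, []) x = (true, [x]) := by
        simp [pvBStep]
      rw [h]
      simpa using bstep_true xs [x] x
    · rw [PySem.List.index?_cons_of_ne xs hx, List.foldl_cons]
      have h : pvBStep border (false, []) x = (false, []) := by
        simp [pvBStep, hx]
      rw [h, ih]
      cases h2 : PySem.List.index? xs border with
      | none => simp
      | some i => simp

lemma flatMap_get_range (l : List Int) :
    List.flatMap (fun a => l[a]?.toList) (List.range l.length) = l := by
  induction l using List.reverseRecOn with
  | nil => simp
  | append_singleton xs x ih =>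
    rw [List.length_append, List.length_singleton, List.range_succ, List.flatMap_append]
    have h1 : (List.range xs.length).flatMap (fun a => (xs ++ [x])[a]?.toList)
        = (List.range xs.length).flatMap (fun a => xs[a]?.toList) := by
      apply List.flatMap_congr
      intro a ha
      rw [List.getElem?_append_left (List.mem_range.mp ha)]
    rw [h1, ih]
    simp

lemma copy_eq (l : List Int) :
    (PySem.List.pyRange 0 (l.length : Int) 1).foldl
      (fun acc j => acc ++ (PySem.List.pyGet? l j).toList) [] = l := by
  rw [PySem.List.foldl_append_eq_flatMap, PySem.List.pyRange_one]
  simp [List.flatMap_map]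
  exact flatMap_get_range l

lemma a_char (items : List Int) (border : Int) :
    remove_all_before items border =
      (match PySem.List.index? items border with
       | some i => items.drop i
       | none => items) := by
  unfold remove_all_before
  cases h : PySem.List.index? items border with
  | some i =>
      simp only [PySem.List.slice_from_natCast, foldl_snoc, List.nil_append]
  | none =>
      simpa using copy_eq items

theorem remove_all_before_spec : Claim_equal_remove_all_before := by
  intro items border _
  unfold Spec_remove_all_before remove_all_before_alt
  rw [a_char, fold_char]
  cases h : PySem.List.index? items border with
  | some i => simp
  | none => simp
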